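-- pv_equiv track=rewrite | github.com/lcoheur/EP2LGP5.0 | Modulo_tradutor/tradutor.py | saber_glosa
-- ===== SOURCE A (Python) =====
-- def saber_glosa(palavra, palavras_glosas, freq, classe, palavra_pt):
-- 	"""
-- 	Retorna a glosa/gesto mais frequente associado à palavra.
-- 	:param palavra: lema(s) palavra(s) em português
-- 	:param palavras_glosas: Lista com as entradas do dicionário
-- 	:param freq: Lista com as frequências das entradas no dicionário
-- 	:param classe: Classe gramatical da(s) palavra(s)
-- 	:param palavra_pt: Palavra(s) em português
-- 	:return: Gesto
-- 	"""
--
-- 	freq_indices = []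
-- 	indices = []
-- 	for i,v in enumerate(palavras_glosas):
-- 		if classe[0] !="N":
--
-- 			if v[1] == palavra:
-- 				freq_indices.append(freq[i])
-- 				indices.append(i)
--
-- 			else:
-- 				continue
-- 		else:
-- 			if v[0] == palavra_pt:
-- 				freq_indices.append(freq[i])
-- 				indices.append(i)
-- 			else:
-- 				continue
--
-- 	gesto = palavras_glosas[indices[freq_indices.index(max(freq_indices))]][2]
-- 	return gesto
-- ===== SOURCE B (Python) =====
-- def saber_glosa(palavra, palavras_glosas, freq, classe, palavra_pt):
--     """Single fused pass: keep (frequency, entry) of the first strictly-highest-frequency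
--     match; only the winning entry's third field is dereferenced at the end."""
--     use_glosa = classe[0] != "N"
--     best = None  # (frequency, entry)
--     for i, v in enumerate(palavras_glosas):
--         if (v[1] == palavra) if use_glosa else (v[0] == palavra_pt):
--             f = freq[i]
--             if best is None or f > best[0]:
--                 best = (f, v)
--     if best is None:
--         raise ValueError("saber_glosa: no dictionary entry matches")
--     return best[1][2]
-- ===== Notes on version B (the rewrite author's own statement) =====
-- stated objective: simpler
-- what changed: B fuses A's collect-two-parallel-lists + max + index + double-dereference pipeline into one pass keeping the best (frequency, entry) pair (strict-greater preserves A's first-maximum tie-break), dereferencing [2] only on the winning entry; B raises ValueError where A's max([]) does.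
import Mathlib
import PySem

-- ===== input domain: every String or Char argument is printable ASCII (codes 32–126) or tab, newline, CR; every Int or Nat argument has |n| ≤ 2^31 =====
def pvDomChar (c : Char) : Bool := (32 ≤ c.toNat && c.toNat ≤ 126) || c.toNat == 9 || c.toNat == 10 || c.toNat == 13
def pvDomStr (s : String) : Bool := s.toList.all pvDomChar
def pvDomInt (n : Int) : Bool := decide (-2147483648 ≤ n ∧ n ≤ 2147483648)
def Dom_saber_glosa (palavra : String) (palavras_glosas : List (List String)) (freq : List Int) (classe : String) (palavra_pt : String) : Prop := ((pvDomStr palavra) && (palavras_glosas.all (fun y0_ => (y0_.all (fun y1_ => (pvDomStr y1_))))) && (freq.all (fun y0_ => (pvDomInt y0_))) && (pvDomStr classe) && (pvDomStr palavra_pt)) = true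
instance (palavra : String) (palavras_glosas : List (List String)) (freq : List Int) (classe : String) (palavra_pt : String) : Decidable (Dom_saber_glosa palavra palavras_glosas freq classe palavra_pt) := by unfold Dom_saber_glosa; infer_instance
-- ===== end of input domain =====

-- B replaces A's collect-lists/max/index/dereference pipeline by one fused best-so-far pass (objective: simpler).
-- Python B raises ValueError where A's max([]) raises ValueError (no match); both cases lie outside Pre_.

-- ===== PORT A =====
-- shared branch condition: `v[1] == palavra if classe[0] != "N" else v[0] == palavra_pt`
-- (classe[0] is a one-character string in Python; comparing its sole Char with 'N' is exact)
def sgCond (c0 : Char) (palavra : String) (palavra_pt : String) (v : List String) : Bool :=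
  if c0 ≠ 'N' then ((PySem.List.pyGet? v 1).getD "") == palavra
  else ((PySem.List.pyGet? v 0).getD "") == palavra_pt

def saber_glosa (palavra : String) (palavras_glosas : List (List String)) (freq : List Int) (classe : String) (palavra_pt : String) : String :=
  let c0 : Char := (PySem.List.pyGet? classe.toList 0).getD 'N'
  -- for i, v in enumerate(palavras_glosas): append freq[i] and i on a match
  let st : List Int × List Int :=
    (PySem.List.enumerate palavras_glosas 0).foldl
      (fun (st : List Int × List Int) iv =>
        if sgCond c0 palavra palavra_pt iv.2 then
          (st.1 ++ [(PySem.List.pyGet? freq iv.1).getD 0], st.2 ++ [iv.1])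
        else st)
      ([], [])
  -- gesto = palavras_glosas[indices[freq_indices.index(max(freq_indices))]][2]
  match PySem.List.max? st.1 (fun x => x) with
  | none => ""
  | some m =>
    match PySem.List.index? st.1 m with
    | none => ""
    | some k =>
      match PySem.List.pyGet? st.2 (k : Int) with
      | none => ""
      | some j =>
        match PySem.List.pyGet? palavras_glosas j with
        | none => ""
        | some v => (PySem.List.pyGet? v 2).getD ""

-- ===== PORT B =====
-- best-so-far update: keep the candidate only if strictly more frequent (first maximum wins)
def sgUpd {α : Type} (best : Option (Int × α)) (cand : Int × α) : Option (Int × α) :=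
  match best with
  | none => some cand
  | some b => if b.1 < cand.1 then some cand else some b

def saber_glosa_alt (palavra : String) (palavras_glosas : List (List String)) (freq : List Int) (classe : String) (palavra_pt : String) : String :=
  let c0 : Char := (PySem.List.pyGet? classe.toList 0).getD 'N'
  let best : Option (Int × List String) :=
    (PySem.List.enumerate palavras_glosas 0).foldl
      (fun best iv =>
        if sgCond c0 palavra palavra_pt iv.2 then
          sgUpd best ((PySem.List.pyGet? freq iv.1).getD 0, iv.2)
        else best)
      none
  match best with
  | none => ""            -- Python B raises ValueError here (outside Pre_)
  | some b => (PySem.List.pyGet? b.2 2).getD ""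

-- ===== PRECONDITION & SPEC =====
-- Pre_ excludes exactly the inputs where Python A raises: empty classe; an entry too short for the branch's
-- v[1]/v[0]; a matched index out of range of freq; no match at all (max([]) raises); and a WINNING match
-- (maximal frequency, strictly above every earlier match) with fewer than 3 fields (its [2] raises).
def Pre_saber_glosa (palavra : String) (palavras_glosas : List (List String)) (freq : List Int) (classe : String) (palavra_pt : String) : Prop :=
  classe ≠ "" ∧
  (∀ v ∈ palavras_glosas, (if classe.toList.headD 'N' ≠ 'N' then 2 else 1) ≤ v.length) ∧
  (∃ v ∈ palavras_glosas, sgCond (classe.toList.headD 'N') palavra palavra_pt v = true) ∧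
  (∀ iv ∈ PySem.List.enumerate palavras_glosas 0,
      sgCond (classe.toList.headD 'N') palavra palavra_pt iv.2 = true → iv.1 < (freq.length : Int)) ∧
  (∀ iv ∈ PySem.List.enumerate palavras_glosas 0,
      sgCond (classe.toList.headD 'N') palavra palavra_pt iv.2 = true →
      (∀ jv ∈ PySem.List.enumerate palavras_glosas 0,
          sgCond (classe.toList.headD 'N') palavra palavra_pt jv.2 = true →
          (PySem.List.pyGet? freq jv.1).getD 0 ≤ (PySem.List.pyGet? freq iv.1).getD 0 ∧
          (jv.1 < iv.1 → (PySem.List.pyGet? freq jv.1).getD 0 < (PySem.List.pyGet? freq iv.1).getD 0)) →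
      3 ≤ iv.2.length)
instance (palavra : String) (palavras_glosas : List (List String)) (freq : List Int) (classe : String) (palavra_pt : String) : Decidable (Pre_saber_glosa palavra palavras_glosas freq classe palavra_pt) := by unfold Pre_saber_glosa; infer_instance

def pvWitness_saber_glosa : String × List (List String) × List Int × String × String :=
  ("g", [["p", "g", "G1"]], [2], "V", "p")

def Spec_saber_glosa (palavra : String) (palavras_glosas : List (List String)) (freq : List Int) (classe : String) (palavra_pt : String) (out : String) : Prop := out = saber_glosa_alt palavra palavras_glosas freq classe palavra_pt
instance (palavra : String) (palavras_glosas : List (List String)) (freq : List Int) (classe : String) (palavra_pt : String) (out : String) : Decidable (Spec_saber_glosa palavra palavras_glosas freq classe palavra_pt out) := by unfold Spec_saber_glosa; infer_instance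

-- ===== CLAIM (what is proved, stated in full; the proofs are below) =====
def Claim_equal_saber_glosa : Prop := ∀ (palavra : String) (palavras_glosas : List (List String)) (freq : List Int) (classe : String) (palavra_pt : String), Dom_saber_glosa palavra palavras_glosas freq classe palavra_pt → Pre_saber_glosa palavra palavras_glosas freq classe palavra_pt → Spec_saber_glosa palavra palavras_glosas freq classe palavra_pt (saber_glosa palavra palavras_glosas freq classe palavra_pt)

-- ===== LEMMAS AND PROOFS =====

-- the strict-greater running best (B's inner update once a first candidate exists)
def sgFm {α : Type} (b cand : Int × α) : Int × α := if b.1 < cand.1 then cand else b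

-- A's loop: two append-accumulators driven by one condition
theorem sg_loopA (cond : Int × List String → Bool) (fval : Int × List String → Int) :
    ∀ (l : List (Int × List String)) (a b : List Int),
      l.foldl (fun (st : List Int × List Int) iv =>
          if cond iv then (st.1 ++ [fval iv], st.2 ++ [iv.1]) else st) (a, b)
        = (a ++ (l.filter cond).map fval, b ++ (l.filter cond).map (·.1)) := by
  intro l
  induction l with
  | nil => simp
  | cons x t ih =>
    intro a b
    by_cases h : cond x <;> simp [h, ih]

-- B's fold, once a candidate is installed, is the running strict max
theorem sg_foldB_some {α : Type} :
    ∀ (t : List (Int × α)) (b : Int × α),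
      t.foldl sgUpd (some b) = some (t.foldl sgFm b) := by
  intro t
  induction t with
  | nil => simp
  | cons p t ih =>
    intro b
    simp only [List.foldl_cons, sgUpd, sgFm]
    by_cases h : b.1 < p.1 <;> simp [h, ih]

-- the first maximum of p.1 :: t.map fst picks out exactly the element B's running best keeps
theorem sg_firstmax {α : Type} :
    ∀ (t : List (Int × α)) (p : Int × α) (k : Nat),
      PySem.List.index? (p.1 :: t.map Prod.fst) ((t.map Prod.fst).foldl max p.1) = some k →
      (p :: t)[k]? = some (t.foldl sgFm p) := by
  intro t
  induction t with
  | nil =>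
    intro p k h
    simp only [List.map_nil, List.foldl_nil, PySem.List.index?_cons_self] at h
    injection h with h
    subst h
    simp
  | cons q t ih =>
    intro p k h
    simp only [List.map_cons, List.foldl_cons] at h
    by_cases hpq : p.1 < q.1
    · -- the head p cannot carry the max: max ≥ q.1 > p.1, so the search moves past p
      have hq : q.1 ≤ (t.map Prod.fst).foldl max (max p.1 q.1) :=
        le_trans (le_max_right _ _) (PySem.List.le_foldl_max _ _).1
      have hne : p.1 ≠ (t.map Prod.fst).foldl max (max p.1 q.1) := by omega
      rw [PySem.List.index?_cons_of_ne _ hne] at h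
      obtain ⟨k', hk', rfl⟩ := Option.map_eq_some_iff.mp h
      have h0 := ih q k' (by
        simpa [max_eq_right (le_of_lt hpq)] using hk')
      simpa [List.foldl_cons, sgFm, hpq] using h0
    · -- q.1 ≤ p.1 : the candidate q is dropped by both sides; reduce to (p :: t)
      have hqp : q.1 ≤ p.1 := le_of_not_gt hpq
      rw [max_eq_left hqp] at h
      by_cases hp : p.1 = (t.map Prod.fst).foldl max p.1
      · -- nothing beats the head value: the first max is p itself
        rw [← hp, PySem.List.index?_cons_self] at h
        injection h with h
        subst h
        have h0 := ih p 0 (by rw [← hp, PySem.List.index?_cons_self])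
        simp only [List.getElem?_cons_zero, Option.some.injEq] at h0 ⊢
        simp [List.foldl_cons, sgFm, hpq, ← h0]
      · -- the max lies strictly inside t: skip both heads
        have hlt : p.1 < (t.map Prod.fst).foldl max p.1 :=
          lt_of_le_of_ne (PySem.List.le_foldl_max _ _).1 hp
        have hne1 : p.1 ≠ (t.map Prod.fst).foldl max p.1 := hp
        have hne2 : q.1 ≠ (t.map Prod.fst).foldl max p.1 := by omega
        rw [PySem.List.index?_cons_of_ne _ hne1, PySem.List.index?_cons_of_ne _ hne2] at h
        obtain ⟨k1, hk1, rfl⟩ := Option.map_eq_some_iff.mp h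
        obtain ⟨k2, hk2, rfl⟩ := Option.map_eq_some_iff.mp hk1
        have h1 := ih p (k2 + 1) (by
          rw [PySem.List.index?_cons_of_ne _ hne1, hk2]; rfl)
        simp only [List.getElem?_cons_succ] at h1 ⊢
        simpa [List.foldl_cons, sgFm, hpq] using h1

-- the two ports agree on every input: the lets/matches of both bodies with the branch test abstracted
theorem sg_core (cond : List String → Bool) (pg : List (List String)) (freq : List Int) :
    (let st : List Int × List Int :=
       (PySem.List.enumerate pg 0).foldl
         (fun (st : List Int × List Int) iv =>
           if cond iv.2 then
             (st.1 ++ [(PySem.List.pyGet? freq iv.1).getD 0], st.2 ++ [iv.1])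
           else st)
         ([], []);
     match PySem.List.max? st.1 (fun x => x) with
     | none => ""
     | some m =>
       match PySem.List.index? st.1 m with
       | none => ""
       | some k =>
         match PySem.List.pyGet? st.2 (k : Int) with
         | none => ""
         | some j =>
           match PySem.List.pyGet? pg j with
           | none => ""
           | some v => (PySem.List.pyGet? v 2).getD "")
    =
    (let best : Option (Int × List String) :=
       (PySem.List.enumerate pg 0).foldl
         (fun best iv =>
           if cond iv.2 then
             sgUpd best ((PySem.List.pyGet? freq iv.1).getD 0, iv.2)
           else best)
         none;
     match best with
     | none => ""
     | some b => (PySem.List.pyGet? b.2 2).getD "") := by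
  have hA := sg_loopA (fun iv => cond iv.2)
      (fun iv => (PySem.List.pyGet? freq iv.1).getD 0) (PySem.List.enumerate pg 0) [] []
  have hB := PySem.List.foldl_if_eq_foldl_filter (fun (iv : Int × List String) => cond iv.2)
      (fun best iv => sgUpd best ((PySem.List.pyGet? freq iv.1).getD 0, iv.2))
      (PySem.List.enumerate pg 0) none
  simp only [hA, hB, List.nil_append]
  generalize hms : (PySem.List.enumerate pg 0).filter (fun iv => cond iv.2) = ms
  cases ms with
  | nil =>
    simp only [List.map_nil, List.foldl_nil]
    rw [show (PySem.List.max? ([] : List Int) (fun x => x)) = none from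
      (PySem.List.max?_eq_none_iff _ _).mpr rfl]
  | cons m0 mt =>
    -- name the candidate list B works on
    have hmapq : List.foldl
        (fun best iv => sgUpd best ((PySem.List.pyGet? freq iv.1).getD 0, iv.2))
        none (m0 :: mt)
        = List.foldl sgUpd none
            ((m0 :: mt).map (fun iv => ((PySem.List.pyGet? freq iv.1).getD 0, iv.2))) := by
      rw [List.foldl_map]
    rw [hmapq]
    set q : Int × List String → Int × List String :=
      fun iv => ((PySem.List.pyGet? freq iv.1).getD 0, iv.2) with hq
    set p : Int × List String := q m0 with hp
    set t : List (Int × List String) := mt.map q with ht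
    -- B side reduces to the running strict max
    have hBval : List.foldl sgUpd none ((m0 :: mt).map q) = some (t.foldl sgFm p) := by
      simp only [List.map_cons, List.foldl_cons, ht]
      rw [show sgUpd none p = some p from rfl, sg_foldB_some]
    -- A side: freq_indices is the fst-projection of the same candidate list
    have hfs : (m0 :: mt).map (fun iv => (PySem.List.pyGet? freq iv.1).getD 0)
        = p.1 :: t.map Prod.fst := by
      simp [hq, hp, ht, List.map_map, Function.comp]
    rw [hfs, hBval, PySem.List.max?_id_cons]
    dsimp only
    -- the max value occurs in the list, so index? succeeds
    have hmem : (t.map Prod.fst).foldl max p.1 ∈ p.1 :: t.map Prod.fst := by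
      rcases PySem.List.foldl_max_mem (t.map Prod.fst) p.1 with h | h
      · rw [h]; exact List.mem_cons_self
      · exact List.mem_cons_of_mem _ h
    obtain ⟨k, hk⟩ := Option.isSome_iff_exists.mp
      ((PySem.List.index?_isSome_iff _ _).mpr hmem)
    rw [hk]
    dsimp only
    -- the element at that index is exactly B's running best
    have hel : (p :: t)[k]? = some (t.foldl sgFm p) := sg_firstmax t p k hk
    have hklt : k < (m0 :: mt).length := by
      have := List.getElem?_eq_some_iff.mp hel
      obtain ⟨hlen, _⟩ := this
      simpa [ht] using hlen
    obtain ⟨e, hE⟩ : ∃ e, (m0 :: mt)[k] = e := ⟨_, rfl⟩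
    -- indices[k] is the winner's enumerate index
    have hidx : PySem.List.pyGet? ((m0 :: mt).map (·.1)) (k : Int) = some e.1 := by
      rw [PySem.List.pyGet?_natCast, List.getElem?_map, List.getElem?_eq_getElem hklt, hE]
      rfl
    rw [hidx]
    dsimp only
    -- the winner came from enumerate pg, so pg[its index] is the winner's entry
    have hmem2 : e ∈ PySem.List.enumerate pg 0 := by
      have he : (m0 :: mt)[k] ∈ m0 :: mt := List.getElem_mem hklt
      rw [hE, ← hms] at he
      exact List.mem_of_mem_filter he
    obtain ⟨kk, hkk, hiv⟩ := (PySem.List.mem_enumerate_iff _ _ _).mp hmem2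
    have hpg : PySem.List.pyGet? pg e.1 = some e.2 := by
      rw [hiv]
      simp [PySem.List.pyGet?_natCast pg kk ▸ (List.getElem?_eq_getElem hkk)]
    rw [hpg]
    dsimp only
    -- and its third field is the [2]-dereference of B's stored winning entry
    have hqk : q e = t.foldl sgFm p := by
      have h1 : (p :: t)[k]? = ((m0 :: mt).map q)[k]? := by simp [hp, ht]
      rw [h1, List.getElem?_map, List.getElem?_eq_getElem hklt, hE] at hel
      simpa using hel
    show (PySem.List.pyGet? e.2 2).getD "" = (PySem.List.pyGet? (t.foldl sgFm p).2 2).getD ""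
    rw [← hqk]

theorem sg_ports_eq (palavra : String) (palavras_glosas : List (List String)) (freq : List Int) (classe : String) (palavra_pt : String) :
    saber_glosa palavra palavras_glosas freq classe palavra_pt
      = saber_glosa_alt palavra palavras_glosas freq classe palavra_pt :=
  sg_core (sgCond ((PySem.List.pyGet? classe.toList 0).getD 'N') palavra palavra_pt) palavras_glosas freq

-- ===== VERDICT (by name: the statement is the Claim_ definition above) =====
theorem saber_glosa_spec : Claim_equal_saber_glosa := by
  intro palavra palavras_glosas freq classe palavra_pt _ _
  simpa only [Spec_saber_glosa] using sg_ports_eq palavra palavras_glosas freq classe palavra_pt
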